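-- pv_equiv track=rewrite | github.com/endomorphosis/ipfs_accelerate_py | test/skills/visualize_test_coverage.py | categorize_models
-- ===== SOURCE A (Python) =====
-- from collections import Counter, defaultdict
--
-- ARCHITECTURES = {
--     "encoder_only": ["bert", "vit", "roberta", "albert", "electra", "convbert"],
--     "decoder_only": ["gpt2", "gptj", "gpt_neo", "llama", "falcon", "mistral"],
--     "encoder_decoder": ["t5", "bart", "pegasus", "mbart", "m2m_100", "led"],
--     "vision": ["vit", "swin", "beit", "deit", "convnext", "sam"],
--     "multimodal": ["clip", "blip", "llava", "flava", "idefics", "paligemma"],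
--     "audio": ["wav2vec2", "hubert", "whisper", "unispeech", "clap", "encodec"]
-- }
--
-- def categorize_models(models):
--     """Categorize models by architecture type."""
--     categorized = defaultdict(list)
--     uncategorized = []
--
--     for model in models:
--         categorized_flag = False
--         for arch, arch_models in ARCHITECTURES.items():
--             for pattern in arch_models:
--                 if model == pattern or model.startswith(pattern + "_"):
--                     categorized[arch].append(model)
--                     categorized_flag = True
--                     break
--             if categorized_flag:
--                 break
--
--         if not categorized_flag:
--             uncategorized.append(model)
--
--     # Add uncategorized as its own category
--     if uncategorized:
--         categorized["uncategorized"] = uncategorized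
--
--     return categorized
-- ===== SOURCE B (Python) =====
-- from collections import defaultdict
--
-- ARCHITECTURES = {
--     "encoder_only": ["bert", "vit", "roberta", "albert", "electra", "convbert"],
--     "decoder_only": ["gpt2", "gptj", "gpt_neo", "llama", "falcon", "mistral"],
--     "encoder_decoder": ["t5", "bart", "pegasus", "mbart", "m2m_100", "led"],
--     "vision": ["vit", "swin", "beit", "deit", "convnext", "sam"],
--     "multimodal": ["clip", "blip", "llava", "flava", "idefics", "paligemma"],
--     "audio": ["wav2vec2", "hubert", "whisper", "unispeech", "clap", "encodec"]
-- }
--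
-- # Inverted index pattern -> architecture, built once; first architecture wins
-- # (so the duplicated "vit" stays mapped to "encoder_only").
-- _INDEX = {}
-- for _arch, _patterns in ARCHITECTURES.items():
--     for _p in _patterns:
--         _INDEX.setdefault(_p, _arch)
--
--
-- def categorize_models(models):
--     """Categorize models by architecture type."""
--     categorized = defaultdict(list)
--     uncategorized = []
--
--     for model in models:
--         # candidate keys: every prefix ending at an underscore boundary, then the full name
--         candidates = [model[:i] for i, ch in enumerate(model) if ch == "_"]
--         candidates.append(model)
--         for c in candidates:
--             arch = _INDEX.get(c)
--             if arch is not None: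
--                 categorized[arch].append(model)
--                 break
--         else:
--             uncategorized.append(model)
--
--     if uncategorized:
--         categorized["uncategorized"] = uncategorized
--
--     return categorized
-- ===== Notes on version B (the rewrite author's own statement) =====
-- stated objective: faster
-- what changed: Replaces the nested scan over all 36 architecture patterns per model by a precomputed inverted index (pattern -> architecture, first-wins via setdefault) looked up at the model's underscore-boundary prefix candidates.
import Mathlib
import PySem

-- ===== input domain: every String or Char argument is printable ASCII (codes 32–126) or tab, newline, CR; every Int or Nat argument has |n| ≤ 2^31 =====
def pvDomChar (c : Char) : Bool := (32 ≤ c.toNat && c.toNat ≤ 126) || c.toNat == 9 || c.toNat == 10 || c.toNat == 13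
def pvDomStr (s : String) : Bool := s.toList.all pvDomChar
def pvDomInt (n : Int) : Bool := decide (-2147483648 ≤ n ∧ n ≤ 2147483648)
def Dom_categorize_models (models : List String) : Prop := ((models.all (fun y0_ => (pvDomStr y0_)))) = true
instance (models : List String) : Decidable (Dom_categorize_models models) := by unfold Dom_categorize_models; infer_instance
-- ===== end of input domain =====

-- B replaces A's per-model scan over all architecture patterns by a precomputed
-- inverted index (pattern -> architecture, first-wins) looked up at the model's
-- underscore-boundary prefix candidates; objective: more idiomatic.


-- ===== PORT A =====
def pvARCHITECTURES : List (String × List String) :=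
  [("encoder_only", ["bert", "vit", "roberta", "albert", "electra", "convbert"]),
   ("decoder_only", ["gpt2", "gptj", "gpt_neo", "llama", "falcon", "mistral"]),
   ("encoder_decoder", ["t5", "bart", "pegasus", "mbart", "m2m_100", "led"]),
   ("vision", ["vit", "swin", "beit", "deit", "convnext", "sam"]),
   ("multimodal", ["clip", "blip", "llava", "flava", "idefics", "paligemma"]),
   ("audio", ["wav2vec2", "hubert", "whisper", "unispeech", "clap", "encodec"])]

-- the nested 'for arch / for pattern' loops with break = first arch whose pattern list has a match
def categorize_models (models : List String) : List (String × List String) :=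
  let st := models.foldl (fun st model =>
    match pvARCHITECTURES.findSome? (fun ap =>
        if ap.2.any (fun p => model == p || PySem.Str.startswith model (p ++ "_"))
        then some ap.1 else none) with
    | some arch => (st.1.insert arch (st.1.getD arch [] ++ [model]), st.2)
    | none => (st.1, st.2 ++ [model]))
    ((PySem.Dict.empty : PySem.Dict String (List String)), ([] : List String))
  (if st.2 ≠ [] then st.1.insert "uncategorized" st.2 else st.1).items

-- ===== PORT B =====
-- inverted index: pattern -> architecture, built once with setdefault (first wins)
def pvIndex : PySem.Dict String String :=
  pvARCHITECTURES.foldl (fun idx ap => ap.2.foldl (fun idx p => idx.setdefault p ap.1) idx)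
    PySem.Dict.empty

def categorize_models_alt (models : List String) : List (String × List String) :=
  let st := models.foldl (fun st model =>
    -- model[:i] with 0 ≤ i < len(model) is List.take i on the code points
    let candidates := ((model.toList.zipIdx.filter (fun ci => ci.1 == '_')).map
        (fun ci => String.ofList (model.toList.take ci.2))) ++ [model]
    match candidates.findSome? (fun c => pvIndex.get? c) with
    | some arch => (st.1.insert arch (st.1.getD arch [] ++ [model]), st.2)
    | none => (st.1, st.2 ++ [model]))
    ((PySem.Dict.empty : PySem.Dict String (List String)), ([] : List String))
  (if st.2 ≠ [] then st.1.insert "uncategorized" st.2 else st.1).items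

-- ===== PRECONDITION & SPEC =====
def Spec_categorize_models (models : List String) (out : List (String × List String)) : Prop := out = categorize_models_alt models
instance (models : List String) (out : List (String × List String)) : Decidable (Spec_categorize_models models out) := by unfold Spec_categorize_models; infer_instance

-- ===== CLAIM (what is proved, stated in full; the proofs are below) =====
def Claim_equal_categorize_models : Prop := ∀ (models : List String), Dom_categorize_models models → Spec_categorize_models models (categorize_models models)

-- ===== LEMMAS AND PROOFS =====
def pvFlat : List (String × String) :=
  pvARCHITECTURES.flatMap (fun ap => ap.2.map (fun p => (p, ap.1)))
def pvKeys : List String := pvFlat.map Prod.fst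
def pvTest (model p : String) : Bool := model == p || PySem.Str.startswith model (p ++ "_")
def pvMatches (l : List Char) (p : String) : Prop := p.toList = l ∨ p.toList ++ ['_'] <+: l
def pvCands (model : String) : List String :=
  ((model.toList.zipIdx.filter (fun ci => ci.1 == '_')).map
      (fun ci => String.ofList (model.toList.take ci.2))) ++ [model]

set_option maxRecDepth 10000 in
theorem pv_no_overlap : pvKeys.all (fun p => pvKeys.all (fun q => !((p.toList ++ ['_']).isPrefixOf q.toList))) = true := by decide

set_option maxRecDepth 10000 in
theorem pv_index_first : pvFlat.all (fun pa => pvIndex.get? pa.1 == (pvFlat.find? (fun x => x.1 == pa.1)).map Prod.snd) = true := by decide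

set_option maxRecDepth 10000 in
theorem pv_index_keys : pvIndex.keys.all (fun c => decide (c ∈ pvKeys)) = true := by decide

-- test ↔ matches
theorem pv_test_iff (model p : String) : pvTest model p = true ↔ pvMatches model.toList p := by
  unfold pvTest pvMatches
  simp only [Bool.or_eq_true, beq_iff_eq, PySem.Str.startswith_eq, PySem.Chars.startswith_iff,
    String.toList_append]
  constructor
  · rintro (rfl | h)
    · exact Or.inl rfl
    · exact Or.inr (by simpa using h)
  · rintro (h | h)
    · exact Or.inl (String.toList_inj.mp h.symm).symm.symm
    · exact Or.inr (by simpa using h)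

-- candidate membership ↔ matches
theorem pv_cands_iff (model c : String) : c ∈ pvCands model ↔ pvMatches model.toList c := by
  unfold pvCands pvMatches
  simp only [List.mem_append, List.mem_singleton, List.mem_map, List.mem_filter,
    beq_iff_eq]
  constructor
  · rintro (⟨⟨ch, i⟩, ⟨hmem, hch⟩, rfl⟩ | rfl)
    · rw [List.mk_mem_zipIdx_iff_getElem?] at hmem
      subst hch
      right
      have hi : i < model.toList.length := List.getElem?_eq_some_iff.mp hmem |>.1
      have : (String.ofList (model.toList.take i)).toList ++ ['_'] = model.toList.take (i+1) := by
        rw [String.toList_ofList, List.take_add_one, hmem]; rfl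
      rw [this]; exact List.take_prefix _ _
    · exact Or.inl rfl
  · rintro (h | h)
    · exact Or.inr (String.toList_inj.mp h)
    · left
      obtain ⟨t, ht⟩ := h
      refine ⟨('_', c.toList.length), ⟨?_, rfl⟩, ?_⟩
      · rw [List.mk_mem_zipIdx_iff_getElem?, ← ht]
        simp
      · rw [← ht]
        show String.ofList (List.take c.toList.length (c.toList ++ ['_'] ++ t)) = c
        rw [List.append_assoc, List.take_append_of_le_length (le_refl _)]
        rw [List.take_length, String.ofList_toList]

-- at most one key matches a given model
theorem pv_unique (l : List Char) (p q : String) (hp : p ∈ pvKeys) (hq : q ∈ pvKeys)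
    (hmp : pvMatches l p) (hmq : pvMatches l q) : p = q := by
  have no : ∀ x ∈ pvKeys, ∀ y ∈ pvKeys, ¬ (x.toList ++ ['_'] <+: y.toList) := by
    intro x hx y hy hpre
    have h := pv_no_overlap
    simp only [List.all_eq_true, Bool.not_eq_true'] at h
    have := h x hx y hy
    rw [← List.isPrefixOf_iff_prefix] at hpre
    simp [hpre] at this
  rcases hmp with hp1 | hp2 <;> rcases hmq with hq1 | hq2
  · exact String.toList_inj.mp (hp1.trans hq1.symm)
  · exact absurd (show q.toList ++ ['_'] <+: p.toList by rw [hp1]; exact hq2) (no q hq p hp)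
  · exact absurd (show p.toList ++ ['_'] <+: q.toList by rw [hq1]; exact hp2) (no p hp q hq)
  · -- both proper underscore prefixes
    have ep : p.toList ++ ['_'] = l.take (p.toList.length + 1) := by
      have := List.prefix_iff_eq_take.mp hp2
      simpa using this
    have eq' : q.toList ++ ['_'] = l.take (q.toList.length + 1) := by
      have := List.prefix_iff_eq_take.mp hq2
      simpa using this
    rcases lt_trichotomy p.toList.length q.toList.length with hlt | heq | hgt
    · exfalso
      apply no p hp q hq
      have hql : q.toList = l.take q.toList.length := by
        simpa using List.prefix_iff_eq_take.mp ((List.prefix_append q.toList ['_']).trans hq2)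
      rw [ep, hql]
      have : l.take (p.toList.length + 1) = (l.take q.toList.length).take (p.toList.length + 1) := by
        rw [List.take_take, min_eq_left (by omega)]
      rw [this]
      exact List.take_prefix _ _
    · apply String.toList_inj.mp
      have hpl := List.prefix_iff_eq_take.mp ((List.prefix_append p.toList ['_']).trans hp2)
      have hql := List.prefix_iff_eq_take.mp ((List.prefix_append q.toList ['_']).trans hq2)
      rw [hpl, hql, heq]
    · exfalso
      apply no q hq p hp
      have hpl : p.toList = l.take p.toList.length := by
        simpa using List.prefix_iff_eq_take.mp ((List.prefix_append p.toList ['_']).trans hp2)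
      rw [eq', hpl]
      have : l.take (q.toList.length + 1) = (l.take p.toList.length).take (q.toList.length + 1) := by
        rw [List.take_take, min_eq_left (by omega)]
      rw [this]
      exact List.take_prefix _ _

-- group-wise findSome? with break = find? over the flattened (pattern, arch) list
theorem pv_flatten {α β : Type} (groups : List (α × List β)) (t : β → Bool) :
    groups.findSome? (fun ap => if ap.2.any t then some ap.1 else none)
      = ((groups.flatMap (fun ap => ap.2.map (fun p => (p, ap.1)))).find? (fun pa => t pa.1)).map Prod.snd := by
  induction groups with
  | nil => rfl
  | cons g gs ih =>
    obtain ⟨a, ps⟩ := g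
    have sub : List.find? (fun pa => t pa.1) (ps.map (fun p => (p, a))) = (ps.find? t).map (fun p => (p, a)) := by
      rw [List.find?_map]; rfl
    rw [List.findSome?_cons, List.flatMap_cons, List.find?_append, sub]
    cases hf : ps.find? t with
    | some p₀ =>
      have hany : ps.any t = true := List.any_eq_true.mpr ⟨p₀, List.mem_of_find?_eq_some hf, List.find?_some hf⟩
      simp [hany]
    | none =>
      have hany : ps.any t = false := by
        rw [List.any_eq_false]; intro x hx
        simpa using List.find?_eq_none.mp hf x hx
      simpa [hany] using ih

-- the first test-hit is the first entry with that key (test depends only on the key)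
theorem pv_find_fst {α : Type} (xs : List (String × α)) (t : String → Bool) (p : String) (a : α)
    (h : xs.find? (fun pa => t pa.1) = some (p, a)) :
    xs.find? (fun pa => pa.1 == p) = some (p, a) := by
  induction xs with
  | nil => simp at h
  | cons x xs ih =>
    rw [List.find?_cons] at h ⊢
    by_cases hx : t x.1
    · simp [hx] at h
      simp [h]
    · simp [hx] at h
      have htp : t p = true := by simpa using List.find?_some h
      have hne : (x.1 == p) = false := by
        by_contra hc
        have hxp : x.1 = p := by simpa using hc
        exact hx (hxp ▸ htp)
      simp [hne]
      exact ih h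

theorem pv_get_mem_keys (c b : String) (h : pvIndex.get? c = some b) : c ∈ pvKeys := by
  have hk : c ∈ pvIndex.keys := by
    by_contra hn
    rw [(PySem.Dict.get?_eq_none_iff_not_mem_keys pvIndex c).mpr hn] at h
    cases h
  have hall := pv_index_keys
  simp only [List.all_eq_true, decide_eq_true_eq] at hall
  exact hall c hk

theorem pv_findSome?_unique {α β : Type} (xs : List α) (f : α → Option β) (p : α) (b : β) :
    p ∈ xs → f p = some b → (∀ c ∈ xs, (f c).isSome → c = p) → xs.findSome? f = some b := by
  induction xs with
  | nil => intro hp; simp at hp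
  | cons x xs ih =>
    intro hp hfp huniq
    rw [List.findSome?_cons]
    cases hfx : f x with
    | some y =>
      have hxp : x = p := huniq x (by simp) (by simp [hfx])
      rw [hxp, hfp] at hfx
      simpa using hfx.symm
    | none =>
      have hpx : p ∈ xs := by
        rcases List.mem_cons.mp hp with rfl | h
        · rw [hfp] at hfx; cases hfx
        · exact h
      exact ih hpx hfp (fun c hc hs => huniq c (List.mem_cons_of_mem _ hc) hs)

-- per-model: A's nested pattern scan equals B's indexed candidate lookup
theorem pv_classify (model : String) :
    pvARCHITECTURES.findSome? (fun ap =>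
        if ap.2.any (fun p => model == p || PySem.Str.startswith model (p ++ "_"))
        then some ap.1 else none)
      = (pvCands model).findSome? (fun c => pvIndex.get? c) := by
  rw [show (fun p : String => model == p || PySem.Str.startswith model (p ++ "_")) = pvTest model from rfl]
  rw [pv_flatten]
  rw [show pvARCHITECTURES.flatMap (fun ap => ap.2.map (fun p => (p, ap.1))) = pvFlat from rfl]
  cases hfind : pvFlat.find? (fun pa => pvTest model pa.1) with
  | none =>
    simp only [Option.map_none]
    symm
    rw [List.findSome?_eq_none_iff]
    intro c hc
    cases hgc : pvIndex.get? c with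
    | none => rfl
    | some b =>
      exfalso
      have hcK : c ∈ pvKeys := pv_get_mem_keys c b hgc
      obtain ⟨pa, hpa, rfl⟩ := List.mem_map.mp hcK
      have ht : pvTest model pa.1 = true := (pv_test_iff _ _).mpr ((pv_cands_iff _ _).mp hc)
      have := List.find?_eq_none.mp hfind pa hpa
      rw [ht] at this
      exact this rfl
  | some pa =>
    obtain ⟨p, a⟩ := pa
    have hmem : (p, a) ∈ pvFlat := List.mem_of_find?_eq_some hfind
    have htp : pvTest model p = true := by simpa using List.find?_some hfind
    have hpK : p ∈ pvKeys := List.mem_map.mpr ⟨(p, a), hmem, rfl⟩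
    have hmatch : pvMatches model.toList p := (pv_test_iff _ _).mp htp
    have hpc : p ∈ pvCands model := (pv_cands_iff _ _).mpr hmatch
    have hfirst := pv_find_fst pvFlat (pvTest model) p a hfind
    have hidx : pvIndex.get? p = some a := by
      have h := pv_index_first
      simp only [List.all_eq_true] at h
      have h2 := h (p, a) hmem
      rw [hfirst] at h2
      simpa using h2
    rw [Option.map_some]
    symm
    exact pv_findSome?_unique _ _ p a hpc hidx (fun c hc hs => by
      cases hgc : pvIndex.get? c with
      | none => rw [hgc] at hs; simp at hs
      | some b =>
        exact pv_unique model.toList c p (pv_get_mem_keys c b hgc) hpK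
          ((pv_cands_iff _ _).mp hc) hmatch)

-- both ports are the same accumulation driven by their classify function
def pvRun (classify : String → Option String) (models : List String) : List (String × List String) :=
  let st := models.foldl (fun st model =>
    match classify model with
    | some arch => (st.1.insert arch (st.1.getD arch [] ++ [model]), st.2)
    | none => (st.1, st.2 ++ [model]))
    ((PySem.Dict.empty : PySem.Dict String (List String)), ([] : List String))
  (if st.2 ≠ [] then st.1.insert "uncategorized" st.2 else st.1).items

theorem pv_a_eq_run (models : List String) :
    categorize_models models = pvRun (fun model => pvARCHITECTURES.findSome? (fun ap =>
        if ap.2.any (fun p => model == p || PySem.Str.startswith model (p ++ "_"))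
        then some ap.1 else none)) models := rfl

theorem pv_b_eq_run (models : List String) :
    categorize_models_alt models = pvRun (fun model => (pvCands model).findSome? (fun c => pvIndex.get? c)) models := rfl



-- ===== VERDICT (by name: the statement is the Claim_ definition above) =====
theorem categorize_models_spec : Claim_equal_categorize_models := by
  intro models _
  unfold Spec_categorize_models
  rw [pv_a_eq_run, pv_b_eq_run, funext pv_classify]
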